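-- pv_equiv track=rewrite | github.com/wonza-hub/Algorithm | 정렬/먹을 것인가 먹힐 것인가.py | solution
-- ===== SOURCE A (Python) =====
-- from bisect import bisect_left
--
-- def solution(a,b):
--     a.sort()
--     b.sort()
--     cnt=0
--     for aa in a:
--         i=bisect_left(b,aa)
--         cnt+=i
--
--     return cnt
-- ===== SOURCE B (Python) =====
-- def solution(a, b):
--     a.sort()
--     b.sort()
--     j = 0
--     cnt = 0
--     for aa in a:
--         while j < len(b) and b[j] < aa:
--             j += 1
--         cnt += j
--     return cnt
-- ===== Notes on version B (the rewrite author's own statement) =====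
-- stated objective: alternative
-- what changed: Replaces per-element binary-search lookups (bisect_left on the sorted b for every element of a) with a single two-pointer linear co-traversal of the two sorted lists, maintaining one monotone index j into b.
import Mathlib
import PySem

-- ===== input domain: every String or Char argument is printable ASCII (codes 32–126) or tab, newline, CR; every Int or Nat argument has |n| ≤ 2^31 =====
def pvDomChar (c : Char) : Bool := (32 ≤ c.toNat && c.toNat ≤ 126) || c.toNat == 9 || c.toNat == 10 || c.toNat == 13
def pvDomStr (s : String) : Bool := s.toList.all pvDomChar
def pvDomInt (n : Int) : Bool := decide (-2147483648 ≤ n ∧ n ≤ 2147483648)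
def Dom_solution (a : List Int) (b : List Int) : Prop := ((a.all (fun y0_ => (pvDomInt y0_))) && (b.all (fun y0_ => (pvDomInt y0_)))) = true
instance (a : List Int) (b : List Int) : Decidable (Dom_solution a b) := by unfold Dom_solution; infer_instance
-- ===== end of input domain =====

-- B replaces A's per-element bisect_left binary searches with one two-pointer linear
-- co-traversal of the two sorted lists (alternative algorithm, same return value).
-- Both A and B sort the argument lists in place (same mutation side effect).

-- ===== PORT A =====
def solution (a : List Int) (b : List Int) : Int :=
  let sa := PySem.List.sorted a (fun x => x)
  let sb := PySem.List.sorted b (fun x => x)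
  sa.foldl (fun cnt aa => cnt + (PySem.List.bisectLeft sb aa : Int)) 0

-- ===== PORT B =====
-- the inner 'while j < len(b) and b[j] < aa: j += 1' loop
def pvAdvance (b : List Int) (aa : Int) (j : Nat) : Nat :=
  if h : j < b.length ∧ b.getD j 0 < aa then pvAdvance b aa (j + 1) else j
termination_by b.length - j
decreasing_by omega

def solution_alt (a : List Int) (b : List Int) : Int :=
  let sa := PySem.List.sorted a (fun x => x)
  let sb := PySem.List.sorted b (fun x => x)
  (sa.foldl (fun p aa =>
      let j := pvAdvance sb aa p.1
      (j, p.2 + (j : Int))) ((0 : Nat), (0 : Int))).2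

-- ===== PRECONDITION & SPEC =====
def Spec_solution (a : List Int) (b : List Int) (out : Int) : Prop := out = solution_alt a b
instance (a : List Int) (b : List Int) (out : Int) : Decidable (Spec_solution a b out) := by unfold Spec_solution; infer_instance

-- ===== CLAIM (what is proved, stated in full; the proofs are below) =====
def Claim_equal_solution : Prop := ∀ (a : List Int) (b : List Int), Dom_solution a b → Spec_solution a b (solution a b)

-- ===== LEMMAS AND PROOFS =====

-- the two-pointer advance from any j ≤ bisectLeft lands exactly on bisectLeft
theorem pvAdvance_eq (sb : List Int) (hs : sb.Pairwise (· ≤ ·)) (aa : Int) :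
    ∀ n j, sb.length - j ≤ n → j ≤ PySem.List.bisectLeft sb aa →
      pvAdvance sb aa j = PySem.List.bisectLeft sb aa := by
  intro n
  induction n with
  | zero =>
    intro j hn hj
    obtain ⟨hL, _, h2⟩ := PySem.List.bisectLeft_spec sb aa hs
    rw [pvAdvance]
    have hjlen : sb.length ≤ j := by omega
    rw [dif_neg (by omega)]
    omega
  | succ n ih =>
    intro j hn hj
    obtain ⟨hL, h1, h2⟩ := PySem.List.bisectLeft_spec sb aa hs
    rw [pvAdvance]
    by_cases hc : j < sb.length ∧ sb.getD j 0 < aa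
    · rw [dif_pos hc]
      obtain ⟨hjl, hlt⟩ := hc
      have hgd : sb.getD j 0 = sb[j] := List.getD_eq_getElem sb 0 hjl
      have hjL : j < PySem.List.bisectLeft sb aa := by
        by_contra hnot
        have := h2 j hjl (by omega)
        rw [hgd] at hlt; omega
      exact ih (j + 1) (by omega) (by omega)
    · rw [dif_neg hc]
      by_cases hjl : j < sb.length
      · have hgd : sb.getD j 0 = sb[j] := List.getD_eq_getElem sb 0 hjl
        have : ¬ sb.getD j 0 < aa := fun h => hc ⟨hjl, h⟩
        have hLj : PySem.List.bisectLeft sb aa ≤ j := by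
          by_contra hnot
          have := h1 j hjl (by omega)
          rw [← hgd] at this; omega
        omega
      · omega

-- bisectLeft is monotone in the query value (on a sorted list)
theorem bisectLeft_mono (sb : List Int) (hs : sb.Pairwise (· ≤ ·)) {x y : Int} (hxy : x ≤ y) :
    PySem.List.bisectLeft sb x ≤ PySem.List.bisectLeft sb y := by
  obtain ⟨hLx, h1x, _⟩ := PySem.List.bisectLeft_spec sb x hs
  obtain ⟨hLy, _, h2y⟩ := PySem.List.bisectLeft_spec sb y hs
  by_contra hnot
  have hjl : PySem.List.bisectLeft sb y < sb.length := by omega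
  have h1 := h1x _ hjl (by omega)
  have h2 := h2y _ hjl (by omega)
  omega

-- the fold invariant: starting from any j below all coming bisectLeft values,
-- B's two-pointer fold computes the same count as A's bisect fold
theorem fold_eq (sb : List Int) (hsb : sb.Pairwise (· ≤ ·)) :
    ∀ (sa : List Int), sa.Pairwise (· ≤ ·) →
      ∀ (j : Nat) (cnt : Int), (∀ aa ∈ sa, j ≤ PySem.List.bisectLeft sb aa) →
        (sa.foldl (fun p aa =>
            let j' := pvAdvance sb aa p.1
            (j', p.2 + (j' : Int))) (j, cnt)).2
        = sa.foldl (fun c aa => c + (PySem.List.bisectLeft sb aa : Int)) cnt := by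
  intro sa
  induction sa with
  | nil => intro _ j cnt _; rfl
  | cons aa t ih =>
    intro hsa j cnt hj
    have hhead : j ≤ PySem.List.bisectLeft sb aa := hj aa (by simp)
    have hadv : pvAdvance sb aa j = PySem.List.bisectLeft sb aa :=
      pvAdvance_eq sb hsb aa (sb.length - j) j (le_refl _) hhead
    simp only [List.foldl_cons, hadv]
    exact ih (List.Pairwise.sublist (List.sublist_cons_self aa t) hsa)
      (PySem.List.bisectLeft sb aa) (cnt + _)
      (fun a' ha' => bisectLeft_mono sb hsb ((List.pairwise_cons.mp hsa).1 a' ha'))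

-- ===== VERDICT (by name: the statement is the Claim_ definition above) =====
theorem solution_spec : Claim_equal_solution := by
  intro a b _
  unfold Spec_solution solution solution_alt
  have hsb : (PySem.List.sorted b (fun x => x)).Pairwise (· ≤ ·) :=
    PySem.List.sorted_pairwise b (fun x => x)
  have hsa : (PySem.List.sorted a (fun x => x)).Pairwise (· ≤ ·) :=
    PySem.List.sorted_pairwise a (fun x => x)
  exact (fold_eq _ hsb _ hsa 0 0 (fun _ _ => Nat.zero_le _)).symm
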